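-- pv_equiv track=rewrite | github.com/aimansalim/outfits | tools/build_manifest.py | detect_style_hints
-- ===== SOURCE A (Python) =====
-- STYLE_KEYWORDS = {
--     "sport": [
--         "nike",
--         "adidas",
--         "new",
--         "balance",
--         "salomon",
--         "runner",
--         "training",
--         "track",
--         "gym",
--         "samba",
--     ],
--     "street": [
--         "street",
--         "graphic",
--         "cargo",
--         "oversized",
--         "salomon",
--         "samba",
--         "golden",
--         "goose",
--         "hoodie",
--         "denim",
--     ],
--     "formal": [
--         "blazer",
--         "trouser",
--         "oxford",
--         "derby",
--         "loafer",
--         "loafers",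
--         "chelsea",
--         "suit",
--         "mocassino",
--         "pleated",
--     ],
--     "casual": [
--         "tee",
--         "tshirt",
--         "polo",
--         "henley",
--         "jean",
--         "jeans",
--         "chino",
--         "sneaker",
--         "sneakers",
--         "linen",
--         "denim",
--     ],
-- }
--
-- def detect_style_hints(tokens: list[str]) -> list[str]:
--     hints: set[str] = set()
--     for style, kws in STYLE_KEYWORDS.items():
--         if any(t in tokens for t in kws):
--             hints.add(style)
--     # Basic type-to-style fallbacks
--     if "tee" in tokens or "tshirt" in tokens or "polo" in tokens or "henley" in tokens:
--         hints.add("casual")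
--     if "blazer" in tokens or "trouser" in tokens or "loafer" in tokens or "loafers" in tokens or "chelsea" in tokens or "mocassino" in tokens:
--         hints.add("formal")
--     if "cargo" in tokens or "denim" in tokens or "samba" in tokens or "salomon" in tokens:
--         hints.add("street")
--     if "nike" in tokens or "adidas" in tokens or "new" in tokens and "balance" in tokens:
--         hints.add("sport")
--     return sorted(hints)
-- ===== SOURCE B (Python) =====
-- STYLE_KEYWORDS = {
--     "sport": [
--         "nike", "adidas", "new", "balance", "salomon",
--         "runner", "training", "track", "gym", "samba",
--     ],
--     "street": [
--         "street", "graphic", "cargo", "oversized", "salomon",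
--         "samba", "golden", "goose", "hoodie", "denim",
--     ],
--     "formal": [
--         "blazer", "trouser", "oxford", "derby", "loafer",
--         "loafers", "chelsea", "suit", "mocassino", "pleated",
--     ],
--     "casual": [
--         "tee", "tshirt", "polo", "henley", "jean", "jeans",
--         "chino", "sneaker", "sneakers", "linen", "denim",
--     ],
-- }
--
-- # Inverted index: keyword token -> list of styles it hints at.
-- _INDEX: dict[str, list[str]] = {}
-- for _style, _kws in STYLE_KEYWORDS.items():
--     for _kw in _kws:
--         _INDEX.setdefault(_kw, []).append(_style)
--
--
-- def detect_style_hints(tokens: list[str]) -> list[str]: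
--     hints: set[str] = set()
--     for t in tokens:
--         for style in _INDEX.get(t, ()):
--             hints.add(style)
--     return sorted(hints)
-- ===== Notes on version B (the rewrite author's own statement) =====
-- stated objective: faster
-- what changed: Replaces A's per-style scans over the token list (plus its four redundant fallback blocks) by a keyword-to-styles inverted index built once from STYLE_KEYWORDS and consulted in a single pass over the tokens.
import Mathlib
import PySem

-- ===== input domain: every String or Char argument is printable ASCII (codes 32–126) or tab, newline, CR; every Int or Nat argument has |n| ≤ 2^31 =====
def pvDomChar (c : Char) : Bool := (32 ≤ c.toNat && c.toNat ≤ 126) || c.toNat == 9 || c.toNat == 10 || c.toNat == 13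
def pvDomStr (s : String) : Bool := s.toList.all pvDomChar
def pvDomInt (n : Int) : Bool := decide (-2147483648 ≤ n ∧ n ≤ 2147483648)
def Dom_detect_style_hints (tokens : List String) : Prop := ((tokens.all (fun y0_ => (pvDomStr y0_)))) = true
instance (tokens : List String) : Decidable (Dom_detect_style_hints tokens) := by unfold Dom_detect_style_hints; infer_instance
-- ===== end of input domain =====

-- B replaces A's per-style scans plus redundant fallback blocks by a keyword→styles inverted
-- index consulted once per input token (objective: alternative data structure).

-- shared module constant STYLE_KEYWORDS (the same dict literal appears in Source A and Source B)
def sportKws : List String := ["nike","adidas","new","balance","salomon","runner","training","track","gym","samba"]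
def streetKws : List String := ["street","graphic","cargo","oversized","salomon","samba","golden","goose","hoodie","denim"]
def formalKws : List String := ["blazer","trouser","oxford","derby","loafer","loafers","chelsea","suit","mocassino","pleated"]
def casualKws : List String := ["tee","tshirt","polo","henley","jean","jeans","chino","sneaker","sneakers","linen","denim"]
def styleKeywordsItems : List (String × List String) :=
  [("sport", sportKws), ("street", streetKws), ("formal", formalKws), ("casual", casualKws)]

-- ===== PORT A =====
def detect_style_hints (tokens : List String) : List String :=
  let hints : PySem.Set String :=
    styleKeywordsItems.foldl
      (fun h p => if p.2.any (fun t => tokens.contains t) then PySem.Set.add h p.1 else h)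
      PySem.Set.empty
  let hints := if tokens.contains "tee" || tokens.contains "tshirt" || tokens.contains "polo" || tokens.contains "henley" then PySem.Set.add hints "casual" else hints
  let hints := if tokens.contains "blazer" || tokens.contains "trouser" || tokens.contains "loafer" || tokens.contains "loafers" || tokens.contains "chelsea" || tokens.contains "mocassino" then PySem.Set.add hints "formal" else hints
  let hints := if tokens.contains "cargo" || tokens.contains "denim" || tokens.contains "samba" || tokens.contains "salomon" then PySem.Set.add hints "street" else hints
  -- Python's and/or precedence: nike or adidas or (new and balance)
  let hints := if tokens.contains "nike" || tokens.contains "adidas" || (tokens.contains "new" && tokens.contains "balance") then PySem.Set.add hints "sport" else hints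
  PySem.List.sorted hints (fun x => x) false

-- ===== PORT B =====
-- module-level inverted index: for kw in kws: _INDEX.setdefault(kw, []).append(style)
def styleIndex : PySem.Dict String (List String) :=
  styleKeywordsItems.foldl
    (fun d p => p.2.foldl (fun d kw => d.modify kw [] (fun ss => ss ++ [p.1])) d)
    PySem.Dict.empty

def detect_style_hints_alt (tokens : List String) : List String :=
  let hints : PySem.Set String :=
    tokens.foldl (fun h t => (styleIndex.getD t []).foldl PySem.Set.add h) PySem.Set.empty
  PySem.List.sorted hints (fun x => x) false

-- ===== PRECONDITION & SPEC =====
def Spec_detect_style_hints (tokens : List String) (out : List String) : Prop := out = detect_style_hints_alt tokens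
instance (tokens : List String) (out : List String) : Decidable (Spec_detect_style_hints tokens out) := by unfold Spec_detect_style_hints; infer_instance

-- ===== CLAIM (what is proved, stated in full; the proofs are below) =====
def Claim_equal_detect_style_hints : Prop := ∀ (tokens : List String), Dom_detect_style_hints tokens → Spec_detect_style_hints tokens (detect_style_hints tokens)

-- ===== LEMMAS AND PROOFS =====

-- the common value of both ports: the four per-style hit tests, emitted in sorted order
def canon (tokens : List String) : List String :=
  (if casualKws.any (fun t => tokens.contains t) then ["casual"] else []) ++
  (if formalKws.any (fun t => tokens.contains t) then ["formal"] else []) ++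
  (if sportKws.any (fun t => tokens.contains t) then ["sport"] else []) ++
  (if streetKws.any (fun t => tokens.contains t) then ["street"] else [])

set_option maxHeartbeats 1000000 in
theorem A_eq_canon (tokens : List String) : detect_style_hints tokens = canon tokens := by
  unfold detect_style_hints canon styleKeywordsItems
  simp only [List.foldl]
  cases hS : sportKws.any (fun t => tokens.contains t) <;>
  cases hSt : streetKws.any (fun t => tokens.contains t) <;>
  cases hF : formalKws.any (fun t => tokens.contains t) <;>
  cases hC : casualKws.any (fun t => tokens.contains t) <;>
    simp only [if_true, if_false, Bool.false_eq_true] <;>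
    simp_all [sportKws, streetKws, formalKws, casualKws, PySem.Set.add, PySem.Set.empty] <;>
    (apply PySem.List.sorted_eq_of_perm_of_pairwise_lt
     · decide
     · simp [List.pairwise_cons, String.lt_iff_toList_lt]
       try decide)

-- the keys of styleIndex, in insertion order
def allKeys : List String :=
  ["nike","adidas","new","balance","salomon","runner","training","track","gym","samba",
   "street","graphic","cargo","oversized","golden","goose","hoodie","denim",
   "blazer","trouser","oxford","derby","loafer","loafers","chelsea","suit","mocassino","pleated",
   "tee","tshirt","polo","henley","jean","jeans","chino","sneaker","sneakers","linen"]

set_option maxRecDepth 4096 in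
theorem styleIndex_eq : styleIndex = PySem.Dict.mk
    [("nike", ["sport"]), ("adidas", ["sport"]), ("new", ["sport"]), ("balance", ["sport"]),
     ("salomon", ["sport", "street"]), ("runner", ["sport"]), ("training", ["sport"]),
     ("track", ["sport"]), ("gym", ["sport"]), ("samba", ["sport", "street"]),
     ("street", ["street"]), ("graphic", ["street"]), ("cargo", ["street"]),
     ("oversized", ["street"]), ("golden", ["street"]), ("goose", ["street"]),
     ("hoodie", ["street"]), ("denim", ["street", "casual"]), ("blazer", ["formal"]),
     ("trouser", ["formal"]), ("oxford", ["formal"]), ("derby", ["formal"]),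
     ("loafer", ["formal"]), ("loafers", ["formal"]), ("chelsea", ["formal"]),
     ("suit", ["formal"]), ("mocassino", ["formal"]), ("pleated", ["formal"]),
     ("tee", ["casual"]), ("tshirt", ["casual"]), ("polo", ["casual"]), ("henley", ["casual"]),
     ("jean", ["casual"]), ("jeans", ["casual"]), ("chino", ["casual"]),
     ("sneaker", ["casual"]), ("sneakers", ["casual"]), ("linen", ["casual"])] := by rfl

set_option maxHeartbeats 2000000 in
theorem idx_mem (t a : String) : a ∈ styleIndex.getD t [] ↔
    (a = "sport" ∧ t ∈ sportKws) ∨ (a = "street" ∧ t ∈ streetKws) ∨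
    (a = "formal" ∧ t ∈ formalKws) ∨ (a = "casual" ∧ t ∈ casualKws) := by
  by_cases ht : t ∈ allKeys
  · fin_cases ht <;>
      simp [styleIndex_eq, PySem.Dict.getD, PySem.Dict.get?_mk_cons,
        sportKws, streetKws, formalKws, casualKws]
  · simp only [allKeys, List.mem_cons, List.not_mem_nil, or_false, not_or] at ht
    obtain ⟨h1,h2,h3,h4,h5,h6,h7,h8,h9,h10,h11,h12,h13,h14,h15,h16,h17,h18,h19,h20,
      h21,h22,h23,h24,h25,h26,h27,h28,h29,h30,h31,h32,h33,h34,h35,h36,h37,h38⟩ := ht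
    simp [styleIndex_eq, PySem.Dict.getD, PySem.Dict.get?_mk_cons, PySem.Dict.get?,
      sportKws, streetKws, formalKws, casualKws,
      Ne.symm h1, Ne.symm h2, Ne.symm h3, Ne.symm h4, Ne.symm h5, Ne.symm h6, Ne.symm h7,
      Ne.symm h8, Ne.symm h9, Ne.symm h10, Ne.symm h11, Ne.symm h12, Ne.symm h13, Ne.symm h14,
      Ne.symm h15, Ne.symm h16, Ne.symm h17, Ne.symm h18, Ne.symm h19, Ne.symm h20,
      Ne.symm h21, Ne.symm h22, Ne.symm h23, Ne.symm h24, Ne.symm h25, Ne.symm h26,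
      Ne.symm h27, Ne.symm h28, Ne.symm h29, Ne.symm h30, Ne.symm h31, Ne.symm h32,
      Ne.symm h33, Ne.symm h34, Ne.symm h35, Ne.symm h36, Ne.symm h37, Ne.symm h38,
      h1,h2,h3,h4,h5,h6,h7,h8,h9,h10,h11,h12,h13,h14,h15,h16,h17,h18,h19,h20,
      h21,h22,h23,h24,h25,h26,h27,h28,h29,h30,h31,h32,h33,h34,h35,h36,h37,h38]

theorem foldl_add_eq_update (s : PySem.Set String) (xs : List String) :
    xs.foldl PySem.Set.add s = PySem.Set.update s xs := rfl

set_option maxRecDepth 4096 in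
theorem mem_B_aux (tokens : List String) (acc : PySem.Set String) (a : String) :
    a ∈ tokens.foldl (fun h t => (styleIndex.getD t []).foldl PySem.Set.add h) acc ↔
      a ∈ acc ∨ ∃ t ∈ tokens, a ∈ styleIndex.getD t [] := by
  induction tokens generalizing acc with
  | nil => simp
  | cons x xs ih =>
    simp only [List.foldl_cons]
    rw [ih]
    have hup : a ∈ (styleIndex.getD x []).foldl PySem.Set.add acc ↔
        a ∈ acc ∨ a ∈ styleIndex.getD x [] := by
      rw [foldl_add_eq_update]; exact PySem.Set.mem_update acc _ a
    rw [hup]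
    simp only [List.mem_cons]
    constructor
    · rintro ((h | h) | ⟨t, ht, h⟩)
      · exact Or.inl h
      · exact Or.inr ⟨x, Or.inl rfl, h⟩
      · exact Or.inr ⟨t, Or.inr ht, h⟩
    · rintro (h | ⟨t, rfl | ht, h⟩)
      · exact Or.inl (Or.inl h)
      · exact Or.inl (Or.inr h)
      · exact Or.inr ⟨t, ht, h⟩

set_option maxRecDepth 4096 in
theorem nodup_B_aux (tokens : List String) (acc : PySem.Set String) (h : acc.Nodup) :
    (tokens.foldl (fun h t => (styleIndex.getD t []).foldl PySem.Set.add h) acc).Nodup := by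
  induction tokens generalizing acc with
  | nil => exact h
  | cons x xs ih =>
    simp only [List.foldl_cons]
    exact ih _ (PySem.Set.nodup_update _ _ h)

theorem anyKw_swap (L tokens : List String) :
    (∃ t ∈ tokens, t ∈ L) ↔ (L.any (fun t => tokens.contains t)) = true := by
  simp only [List.any_eq_true, List.contains_iff_mem]
  exact ⟨fun ⟨t, ht, h⟩ => ⟨t, h, ht⟩, fun ⟨t, ht, h⟩ => ⟨t, h, ht⟩⟩

theorem mem_canon (tokens : List String) (a : String) :
    a ∈ canon tokens ↔
      (a = "sport" ∧ (sportKws.any (fun t => tokens.contains t)) = true) ∨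
      (a = "street" ∧ (streetKws.any (fun t => tokens.contains t)) = true) ∨
      (a = "formal" ∧ (formalKws.any (fun t => tokens.contains t)) = true) ∨
      (a = "casual" ∧ (casualKws.any (fun t => tokens.contains t)) = true) := by
  unfold canon
  cases hS : sportKws.any (fun t => tokens.contains t) <;>
  cases hSt : streetKws.any (fun t => tokens.contains t) <;>
  cases hF : formalKws.any (fun t => tokens.contains t) <;>
  cases hC : casualKws.any (fun t => tokens.contains t) <;>
    simp <;> tauto

theorem nodup_canon (tokens : List String) : (canon tokens).Nodup := by
  unfold canon
  cases hS : sportKws.any (fun t => tokens.contains t) <;>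
  cases hSt : streetKws.any (fun t => tokens.contains t) <;>
  cases hF : formalKws.any (fun t => tokens.contains t) <;>
  cases hC : casualKws.any (fun t => tokens.contains t) <;> decide

theorem pairwise_canon (tokens : List String) :
    (canon tokens).Pairwise (fun x y => (fun z => z) x < (fun z => z) y) := by
  unfold canon
  cases hS : sportKws.any (fun t => tokens.contains t) <;>
  cases hSt : streetKws.any (fun t => tokens.contains t) <;>
  cases hF : formalKws.any (fun t => tokens.contains t) <;>
  cases hC : casualKws.any (fun t => tokens.contains t) <;>
    simp [List.pairwise_cons, String.lt_iff_toList_lt] <;> decide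

set_option maxRecDepth 4096 in
theorem B_eq_canon (tokens : List String) : detect_style_hints_alt tokens = canon tokens := by
  unfold detect_style_hints_alt
  apply PySem.List.sorted_eq_of_perm_of_pairwise_lt
  · apply (List.perm_ext_iff_of_nodup (nodup_canon tokens) (nodup_B_aux tokens _ List.nodup_nil)).mpr
    intro a
    rw [mem_canon, mem_B_aux]
    simp only [List.not_mem_nil, false_or]
    constructor
    · rintro (⟨rfl, h⟩ | ⟨rfl, h⟩ | ⟨rfl, h⟩ | ⟨rfl, h⟩) <;>
        · obtain ⟨t, ht, hL⟩ := (anyKw_swap _ tokens).mpr h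
          exact ⟨t, ht, by rw [idx_mem]; simp [hL]⟩
    · rintro ⟨t, ht, h⟩
      rw [idx_mem] at h
      rcases h with ⟨rfl, hL⟩ | ⟨rfl, hL⟩ | ⟨rfl, hL⟩ | ⟨rfl, hL⟩
      · exact Or.inl ⟨rfl, (anyKw_swap _ tokens).mp ⟨t, ht, hL⟩⟩
      · exact Or.inr (Or.inl ⟨rfl, (anyKw_swap _ tokens).mp ⟨t, ht, hL⟩⟩)
      · exact Or.inr (Or.inr (Or.inl ⟨rfl, (anyKw_swap _ tokens).mp ⟨t, ht, hL⟩⟩))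
      · exact Or.inr (Or.inr (Or.inr ⟨rfl, (anyKw_swap _ tokens).mp ⟨t, ht, hL⟩⟩))
  · exact pairwise_canon tokens

-- ===== VERDICT (by name: the statement is the Claim_ definition above) =====
theorem detect_style_hints_spec : Claim_equal_detect_style_hints := by
  intro tokens _
  unfold Spec_detect_style_hints
  rw [A_eq_canon, B_eq_canon]
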